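-- pv_equiv track=rewrite | github.com/Jyoungjo/Algorithm_python | 백준/Silver/13305. 주유소/주유소.py | solution
-- ===== SOURCE A (Python) =====
-- def solution(N, roads, oils):
--     res, idx = 0, 0
--     stack = []
--     for i in range(N):
--         stack.append(roads[i])
--         if oils[idx] > oils[i]:
--             while stack:
--                 res += oils[idx] * stack.pop()
--             idx = i
--     if stack:
--         while stack:
--             res += oils[idx] * stack.pop()
--     return res
-- ===== SOURCE B (Python) =====
-- def solution(N, roads, oils):
--     if N <= 0:
--         return 0
--     res = 0
--     best = oils[0]
--     for i in range(N):
--         res += best * roads[i]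
--         if oils[i] < best:
--             best = oils[i]
--     return res
-- ===== Notes on version B (the rewrite author's own statement) =====
-- stated objective: simpler
-- what changed: Replaced A's stack-and-flush grouping (append each road, flush the whole stack at each strictly cheaper station) with an eager single-pass scan that charges each road immediately at a lagged running minimum price, removing the inner while-loops and the stack.
import Mathlib
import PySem

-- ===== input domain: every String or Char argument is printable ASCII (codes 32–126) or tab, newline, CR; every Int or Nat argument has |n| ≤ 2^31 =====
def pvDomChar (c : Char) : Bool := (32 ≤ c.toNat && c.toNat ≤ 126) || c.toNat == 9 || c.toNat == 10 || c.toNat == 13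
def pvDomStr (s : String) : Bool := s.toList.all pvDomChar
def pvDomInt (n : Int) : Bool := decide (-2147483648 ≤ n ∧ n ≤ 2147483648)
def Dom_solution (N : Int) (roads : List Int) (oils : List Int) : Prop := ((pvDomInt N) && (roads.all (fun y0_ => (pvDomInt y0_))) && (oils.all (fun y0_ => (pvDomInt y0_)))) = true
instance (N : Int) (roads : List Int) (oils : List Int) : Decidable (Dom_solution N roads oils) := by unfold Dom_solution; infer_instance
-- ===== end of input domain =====

-- B replaces A's stack-and-flush grouping with a single pass charging each road at a lagged running minimum price (simpler).


-- ===== PORT A =====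
-- loop body of A: append roads[i] to the stack; if oils[idx] > oils[i], flush the stack
-- (the 'while stack: res += oils[idx] * stack.pop()' is the foldl over stack.reverse) and set idx := i
def stepA (roads oils : List Int) (st : Int × Int × List Int) (i : Int) : Int × Int × List Int :=
  let stack := st.2.2 ++ [PySem.List.pyGetD roads i 0]
  if PySem.List.pyGetD oils st.2.1 0 > PySem.List.pyGetD oils i 0 then
    (stack.reverse.foldl (fun r x => r + PySem.List.pyGetD oils st.2.1 0 * x) st.1, i, ([] : List Int))
  else (st.1, st.2.1, stack)

def solution (N : Int) (roads : List Int) (oils : List Int) : Int :=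
  let st := (PySem.List.pyRange 0 N 1).foldl (stepA roads oils) (0, 0, ([] : List Int))
  if st.2.2 ≠ [] then
    st.2.2.reverse.foldl (fun r x => r + PySem.List.pyGetD oils st.2.1 0 * x) st.1
  else st.1

-- ===== PORT B =====
-- loop body of B: charge road i at the current minimum, then update the minimum with oils[i]
def stepB (roads oils : List Int) (st : Int × Int) (i : Int) : Int × Int :=
  (st.1 + st.2 * PySem.List.pyGetD roads i 0,
   if PySem.List.pyGetD oils i 0 < st.2 then PySem.List.pyGetD oils i 0 else st.2)

def solution_alt (N : Int) (roads : List Int) (oils : List Int) : Int :=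
  if N ≤ 0 then 0
  else ((PySem.List.pyRange 0 N 1).foldl (stepB roads oils) (0, PySem.List.pyGetD oils 0 0)).1

-- ===== PRECONDITION & SPEC =====
-- Pre_ excludes exactly the inputs where A raises IndexError: 0 < N but roads or oils shorter than N.
def Pre_solution (N : Int) (roads : List Int) (oils : List Int) : Prop :=
  N ≤ 0 ∨ (N ≤ (roads.length : Int) ∧ N ≤ (oils.length : Int))
instance (N : Int) (roads : List Int) (oils : List Int) : Decidable (Pre_solution N roads oils) := by unfold Pre_solution; infer_instance
def pvWitness_solution : Int × List Int × List Int := (3, ([2, 3, 1], [5, 2, 4]))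

def Spec_solution (N : Int) (roads : List Int) (oils : List Int) (out : Int) : Prop := out = solution_alt N roads oils
instance (N : Int) (roads : List Int) (oils : List Int) (out : Int) : Decidable (Spec_solution N roads oils out) := by unfold Spec_solution; infer_instance

-- ===== CLAIM (what is proved, stated in full; the proofs are below) =====
def Claim_equal_solution : Prop := ∀ (N : Int) (roads : List Int) (oils : List Int), Dom_solution N roads oils → Pre_solution N roads oils → Spec_solution N roads oils (solution N roads oils)

-- ===== LEMMAS AND PROOFS =====

-- A's flush loop adds oils[idx] times the sum of the stack
lemma flush_eq (c : Int) (l : List Int) : ∀ res : Int, l.foldl (fun r x => r + c * x) res = res + c * l.sum := by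
  induction l with
  | nil => simp
  | cons x xs ih => intro res; simp only [List.foldl_cons, List.sum_cons, ih]; ring

-- invariant: B's running result equals A's result plus the pending stack charged at oils[idx],
-- and B's running minimum is oils[idx]; preserved by each step, for any list of indices
lemma inv (roads oils : List Int) (l : List Int) : ∀ (res idx : Int) (stack : List Int),
    (l.foldl (stepB roads oils) (res + PySem.List.pyGetD oils idx 0 * stack.sum, PySem.List.pyGetD oils idx 0)).1
    = (fun st : Int × Int × List Int => st.1 + PySem.List.pyGetD oils st.2.1 0 * st.2.2.sum)
        (l.foldl (stepA roads oils) (res, idx, stack)) := by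
  induction l with
  | nil => intro res idx stack; simp
  | cons i l ih =>
    intro res idx stack
    simp only [List.foldl_cons]
    by_cases h : PySem.List.pyGetD oils idx 0 > PySem.List.pyGetD oils i 0
    · -- flush case: A empties the stack charged at oils[idx]; B's minimum drops to oils[i]
      have hA : stepA roads oils (res, idx, stack) i =
          (res + PySem.List.pyGetD oils idx 0 * (stack.sum + PySem.List.pyGetD roads i 0), i, ([] : List Int)) := by
        simp only [stepA, if_pos h, flush_eq, List.sum_reverse, List.sum_append, List.sum_cons,
          List.sum_nil, add_zero]
      have hB : stepB roads oils (res + PySem.List.pyGetD oils idx 0 * stack.sum, PySem.List.pyGetD oils idx 0) i =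
          (res + PySem.List.pyGetD oils idx 0 * (stack.sum + PySem.List.pyGetD roads i 0), PySem.List.pyGetD oils i 0) := by
        simp only [stepB, if_pos h, Prod.mk.injEq]
        exact ⟨by ring, trivial⟩
      rw [hA, hB]
      simpa using ih (res + PySem.List.pyGetD oils idx 0 * (stack.sum + PySem.List.pyGetD roads i 0)) i []
    · -- no flush: A pushes roads[i]; B's minimum is unchanged since ¬(oils[i] < oils[idx])
      have hA : stepA roads oils (res, idx, stack) i =
          (res, idx, stack ++ [PySem.List.pyGetD roads i 0]) := by
        simp only [stepA, if_neg h]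
      have hB : stepB roads oils (res + PySem.List.pyGetD oils idx 0 * stack.sum, PySem.List.pyGetD oils idx 0) i =
          (res + PySem.List.pyGetD oils idx 0 * (stack ++ [PySem.List.pyGetD roads i 0]).sum, PySem.List.pyGetD oils idx 0) := by
        simp only [stepB, if_neg h, Prod.mk.injEq, List.sum_append, List.sum_cons, List.sum_nil, add_zero]
        exact ⟨by ring, trivial⟩
      rw [hA, hB, ih]

-- ===== VERDICT (by name: the statement is the Claim_ definition above) =====
theorem solution_spec : Claim_equal_solution := by
  intro N roads oils _ _
  unfold Spec_solution solution solution_alt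
  by_cases hN : N ≤ 0
  · simp [PySem.List.pyRange_one_eq_nil hN]
  · simp only [if_neg hN]
    have h := inv roads oils (PySem.List.pyRange 0 N 1) 0 0 []
    simp only [List.sum_nil, mul_zero, add_zero] at h
    rw [h]
    set st := (PySem.List.pyRange 0 N 1).foldl (stepA roads oils) (0, 0, ([] : List Int)) with hst
    show (if st.2.2 ≠ [] then st.2.2.reverse.foldl (fun r x => r + PySem.List.pyGetD oils st.2.1 0 * x) st.1 else st.1)
      = st.1 + PySem.List.pyGetD oils st.2.1 0 * st.2.2.sum
    by_cases hs : st.2.2 = []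
    · simp [hs]
    · rw [if_pos hs, flush_eq, List.sum_reverse]
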